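-- pv_equiv track=rewrite | github.com/Arpita-B-K/Training_scheduling_software | CLI_mod.py | sort_fun
-- ===== SOURCE A (Python) =====
-- def sort_fun(sk):
--     l=[]
--     for ele in sk:
--         if(ele != ','):
--             l.append(int(ele))
--     l.sort()
--     sk=""
--     for ele in l:
--         sk=sk+str(ele)+","
--     return sk
-- ===== SOURCE B (Python) =====
-- def sort_fun(sk):
--     counts = [0] * 10
--     for ele in sk:
--         if ele != ',':
--             counts[int(ele)] += 1
--     out = ""
--     for d in range(10):
--         out += (str(d) + ",") * counts[d]
--     return out
-- ===== Notes on version B (the rewrite author's own statement) =====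
-- stated objective: faster
-- what changed: Replaces the comparison sort plus quadratic string re-concatenation with a counting sort over the fixed digit domain: one pass builds a 10-slot count array, then the output is emitted digit by digit with string repetition.
import Mathlib
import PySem

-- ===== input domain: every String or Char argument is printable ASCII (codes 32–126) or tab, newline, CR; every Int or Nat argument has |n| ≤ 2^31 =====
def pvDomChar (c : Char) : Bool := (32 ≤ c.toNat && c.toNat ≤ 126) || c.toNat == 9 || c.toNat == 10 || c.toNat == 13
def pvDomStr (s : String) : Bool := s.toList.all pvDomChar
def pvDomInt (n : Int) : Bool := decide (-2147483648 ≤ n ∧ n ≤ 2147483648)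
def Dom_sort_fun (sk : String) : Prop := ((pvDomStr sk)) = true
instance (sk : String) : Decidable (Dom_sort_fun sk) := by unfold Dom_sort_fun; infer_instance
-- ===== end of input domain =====

-- B replaces A's comparison sort + repeated string re-concatenation by a counting sort
-- over the fixed digit domain (objective: faster).


-- shared helper: int(ele) on a one-character string (both Pythons call int(ele))
def pyIntChar (c : Char) : Int := (PySem.Int.ofChars? [c]).getD 0

-- ===== PORT A =====
def sort_fun (sk : String) : String :=
  let l : List Int :=
    sk.toList.foldl (fun l ele => if ele ≠ ',' then l ++ [pyIntChar ele] else l) []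
  let ls := PySem.List.sorted l (fun x => x) false
  ls.foldl (fun s ele => s ++ PySem.Int.toStr ele ++ ",") ""

-- ===== PORT B =====
-- port of Python's  s * n  (string repetition)
def strRep (s : String) (n : Int) : String := String.ofList (PySem.List.pyRepeat s.toList n)

def sort_fun_alt (sk : String) : String :=
  let counts : List Int :=
    sk.toList.foldl (fun counts ele =>
      if ele ≠ ',' then
        PySem.List.pySetD counts (pyIntChar ele) (PySem.List.pyGetD counts (pyIntChar ele) 0 + 1)
      else counts) (List.replicate 10 0)
  (PySem.List.pyRange 0 10 1).foldl
    (fun out d => out ++ strRep (PySem.Int.toStr d ++ ",") (PySem.List.pyGetD counts d 0)) ""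

-- ===== PRECONDITION & SPEC =====
-- Pre_ excludes exactly the inputs containing a character that is neither a digit nor a comma,
-- on which Python A (and B) raise ValueError from int(ele).
def Pre_sort_fun (sk : String) : Prop := (sk.toList.all (fun c => c == ',' || c.isDigit)) = true
instance (sk : String) : Decidable (Pre_sort_fun sk) := by unfold Pre_sort_fun; infer_instance
def pvWitness_sort_fun : String := "3,1,2,1"

def Spec_sort_fun (sk : String) (out : String) : Prop := out = sort_fun_alt sk
instance (sk : String) (out : String) : Decidable (Spec_sort_fun sk out) := by
  unfold Spec_sort_fun; infer_instance

-- ===== CLAIM =====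
def Claim_equal_sort_fun : Prop :=
  ∀ (sk : String), Dom_sort_fun sk → Pre_sort_fun sk → Spec_sort_fun sk (sort_fun sk)

-- ===== LEMMAS AND PROOFS =====
theorem digit_enum (c : Char) (h : c.isDigit) :
    c ∈ ['0','1','2','3','4','5','6','7','8','9'] := by
  have hb : 48 ≤ c.toNat ∧ c.toNat ≤ 57 := by
    simp only [Char.isDigit, Bool.and_eq_true, decide_eq_true_eq] at h
    obtain ⟨h1, h2⟩ := h
    constructor <;> [exact h1; exact h2]
  have hof := Char.ofNat_toNat c
  have h10 : c.toNat = 48 ∨ c.toNat = 49 ∨ c.toNat = 50 ∨ c.toNat = 51 ∨ c.toNat = 52 ∨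
      c.toNat = 53 ∨ c.toNat = 54 ∨ c.toNat = 55 ∨ c.toNat = 56 ∨ c.toNat = 57 := by omega
  rcases h10 with h|h|h|h|h|h|h|h|h|h <;> rw [h] at hof <;> rw [← hof] <;> decide
theorem pyIntChar_digit_mem (c : Char) (h : c.isDigit) :
    pyIntChar c ∈ ([0,1,2,3,4,5,6,7,8,9] : List Int) := by
  have := digit_enum c h
  fin_cases this <;> decide
theorem foldl_append_if_eq (cs : List Char) (acc : List Int) :
    cs.foldl (fun l ele => if ele ≠ ',' then l ++ [pyIntChar ele] else l) acc
      = acc ++ (cs.filter (fun c => c ≠ ',')).map pyIntChar := by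
  induction cs generalizing acc with
  | nil => simp
  | cons c cs ih =>
    simp only [List.foldl_cons]
    by_cases hc : c = ','
    · rw [if_neg (by simp [hc]), ih]
      simp [hc]
    · rw [if_pos (by simp [hc]), ih]
      simp [hc]
theorem count_flatMap_replicate (ds : List Int) (hnd : ds.Nodup) (l : List Int) (a : Int) :
    (ds.flatMap fun d => List.replicate (l.count d) d).count a
      = if a ∈ ds then l.count a else 0 := by
  induction ds with
  | nil => simp
  | cons d ds ih =>
    simp only [List.flatMap_cons, List.count_append, List.nodup_cons] at *
    rw [ih hnd.2, List.count_replicate]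
    by_cases ha : a = d
    · subst ha
      simp [hnd.1]
    · simp [ha, Ne.symm ha]
theorem perm_flatMap_replicate (ds : List Int) (hnd : ds.Nodup) (l : List Int)
    (hl : ∀ x ∈ l, x ∈ ds) :
    (ds.flatMap fun d => List.replicate (l.count d) d).Perm l := by
  rw [List.perm_iff_count]
  intro a
  rw [count_flatMap_replicate ds hnd l a]
  by_cases ha : a ∈ ds
  · simp [ha]
  · simp [ha]
    exact (List.count_eq_zero_of_not_mem (fun hm => ha (hl a hm))).symm
theorem pairwise_flatMap_replicate (ds : List Int) (hp : ds.Pairwise (fun a b => a < b)) (l : List Int) :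
    (ds.flatMap fun d => List.replicate (l.count d) d).Pairwise (· ≤ ·) := by
  induction ds with
  | nil => simp
  | cons d ds ih =>
    rw [List.pairwise_cons] at hp
    simp only [List.flatMap_cons]
    rw [List.pairwise_append]
    refine ⟨?_, ih hp.2, ?_⟩
    · exact List.pairwise_replicate.mpr (Or.inr le_rfl)
    · intro x hx y hy
      rw [List.eq_of_mem_replicate hx]
      rw [List.mem_flatMap] at hy
      obtain ⟨d', hd', hy'⟩ := hy
      rw [List.eq_of_mem_replicate hy']
      exact le_of_lt (hp.1 d' hd')
theorem sorted_eq_canon (l : List Int) (hl : ∀ x ∈ l, x ∈ ([0,1,2,3,4,5,6,7,8,9] : List Int)) :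
    PySem.List.sorted l (fun x => x) false
      = ([0,1,2,3,4,5,6,7,8,9] : List Int).flatMap (fun d => List.replicate (l.count d) d) := by
  apply PySem.List.sorted_id_eq_of_perm_of_pairwise
  · exact perm_flatMap_replicate _ (by decide) l hl
  · exact pairwise_flatMap_replicate ([0,1,2,3,4,5,6,7,8,9] : List Int) (by norm_num) l
theorem outA_toList (ys : List Int) (acc : String) :
    (ys.foldl (fun s ele => s ++ PySem.Int.toStr ele ++ ",") acc).toList
      = acc.toList ++ ys.flatMap (fun e => PySem.Int.toChars e ++ [',']) := by
  induction ys generalizing acc with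
  | nil => simp
  | cons e ys ih =>
    rw [List.foldl_cons, ih]
    simp [PySem.Int.toList_toStr]
theorem outB_toList (cnt : Int → Int) (ds : List Int) (acc : String) :
    (ds.foldl (fun out d => out ++ strRep (PySem.Int.toStr d ++ ",") (cnt d)) acc).toList
      = acc.toList ++ ds.flatMap (fun d => (List.replicate (cnt d).toNat (PySem.Int.toChars d ++ [','])).flatten) := by
  induction ds generalizing acc with
  | nil => simp
  | cons d ds ih =>
    rw [List.foldl_cons, ih]
    simp [strRep, PySem.List.pyRepeat, PySem.Int.toList_toStr]
theorem pyIntChar_digit_natCast (c : Char) (h : c.isDigit) :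
    pyIntChar c = ((c.toNat - 48 : Nat) : Int) := by
  have := digit_enum c h
  fin_cases this <;> decide
theorem counts_fold (cs : List Char) (counts : List Int) (hlen : counts.length = 10)
    (hcs : ∀ c ∈ cs, c = ',' ∨ c.isDigit) (k : Nat) (hk : k < 10) :
    (cs.foldl (fun counts ele =>
        if ele ≠ ',' then
          PySem.List.pySetD counts (pyIntChar ele) (PySem.List.pyGetD counts (pyIntChar ele) 0 + 1)
        else counts) counts).getD k 0
      = counts.getD k 0 + (((cs.filter (fun c => c ≠ ',')).map pyIntChar).count (k : Int) : Int) := by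
  induction cs generalizing counts with
  | nil => simp
  | cons c cs ih =>
    simp only [List.foldl_cons]
    by_cases hc : c = ','
    · rw [if_neg (by simp [hc])]
      rw [ih counts hlen (fun x hx => hcs x (List.mem_cons_of_mem c hx))]
      simp [hc]
    · have hd : c.isDigit := (hcs c (List.mem_cons_self ..)).resolve_left hc
      have hmlt : c.toNat - 48 < 10 := by
        have := digit_enum c hd
        fin_cases this <;> decide
      rw [if_pos (by simp [hc])]
      rw [pyIntChar_digit_natCast c hd]
      rw [PySem.List.pySetD_natCast, PySem.List.pyGetD_natCast]
      have hlen' : (counts.set (c.toNat - 48) (counts.getD (c.toNat - 48) 0 + 1)).length = 10 := by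
        simp [hlen]
      rw [ih _ hlen' (fun x hx => hcs x (List.mem_cons_of_mem c hx))]
      rw [List.filter_cons_of_pos (by simp [hc]), List.map_cons, List.count_cons]
      rw [List.getD_eq_getElem?_getD, List.getElem?_set]
      rw [show counts.getD k 0 = (counts[k]?).getD 0 from List.getD_eq_getElem?_getD]
      by_cases hkm : k = c.toNat - 48
      · subst hkm
        rw [pyIntChar_digit_natCast c hd]
        simp [hlen, hmlt]
        omega
      · have : ((k : Int)) ≠ ((c.toNat - 48 : Nat) : Int) := by
          intro hcon
          exact hkm (by exact_mod_cast hcon)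
        rw [pyIntChar_digit_natCast c hd]
        simp [Ne.symm hkm]
theorem counts_len (cs : List Char) (counts : List Int) :
    (cs.foldl (fun counts ele =>
        if ele ≠ ',' then
          PySem.List.pySetD counts (pyIntChar ele) (PySem.List.pyGetD counts (pyIntChar ele) 0 + 1)
        else counts) counts).length = counts.length := by
  induction cs generalizing counts with
  | nil => rfl
  | cons c cs ih =>
    simp only [List.foldl_cons]
    split
    · rw [ih]
      exact PySem.List.length_pySetD ..
    · exact ih counts
theorem flatMap_congr_mem {α β : Type} (l : List α) (f g : α → List β)
    (h : ∀ x ∈ l, f x = g x) : l.flatMap f = l.flatMap g := by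
  induction l with
  | nil => rfl
  | cons x l ih =>
    simp only [List.flatMap_cons]
    rw [h x (List.mem_cons_self ..), ih (fun y hy => h y (List.mem_cons_of_mem x hy))]
theorem block_eq (n : Nat) (d : Int) (h : Int → List Char) :
    (List.replicate n d).flatMap h = (List.replicate n (h d)).flatten := by
  simp [List.flatMap, List.map_replicate]

-- ===== VERDICT =====
theorem sort_fun_spec : Claim_equal_sort_fun := by
  intro sk _hdom hpre
  show sort_fun sk = sort_fun_alt sk
  have hpre : (sk.toList.all (fun c => c == ',' || c.isDigit)) = true := hpre
  have hcs : ∀ c ∈ sk.toList, c = ',' ∨ c.isDigit := by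
    intro c hc
    have := List.all_eq_true.mp hpre c hc
    simpa using this
  have hl : ∀ x ∈ (sk.toList.filter (fun c => c ≠ ',')).map pyIntChar,
      x ∈ ([0,1,2,3,4,5,6,7,8,9] : List Int) := by
    intro x hx
    simp only [List.mem_map, List.mem_filter] at hx
    obtain ⟨c, ⟨hc1, hc2⟩, rfl⟩ := hx
    exact pyIntChar_digit_mem c ((hcs c hc1).resolve_left (by simpa using hc2))
  -- A side
  have hA : (sort_fun sk).toList
      = ([0,1,2,3,4,5,6,7,8,9] : List Int).flatMap
          (fun d => (List.replicate (((sk.toList.filter (fun c => c ≠ ',')).map pyIntChar).count d)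
            (PySem.Int.toChars d ++ [','])).flatten) := by
    simp only [sort_fun]
    rw [foldl_append_if_eq, List.nil_append, sorted_eq_canon _ hl, outA_toList]
    rw [List.flatMap_assoc]
    rw [flatMap_congr_mem _ _ _ (fun d _ => block_eq _ d _)]
    simp
  -- B side
  have hlenF : (sk.toList.foldl (fun counts ele =>
      if ele ≠ ',' then
        PySem.List.pySetD counts (pyIntChar ele) (PySem.List.pyGetD counts (pyIntChar ele) 0 + 1)
      else counts) (List.replicate 10 (0:Int))).length = 10 := by
    rw [counts_len]; simp
  have hcnt : ∀ (k : Nat), k < 10 → PySem.List.pyGetD (sk.toList.foldl (fun counts ele =>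
      if ele ≠ ',' then
        PySem.List.pySetD counts (pyIntChar ele) (PySem.List.pyGetD counts (pyIntChar ele) 0 + 1)
      else counts) (List.replicate 10 (0:Int))) (k : Int) 0
      = ((((sk.toList.filter (fun c => c ≠ ',')).map pyIntChar).count (k : Int) : Nat) : Int) := by
    intro k hk
    rw [PySem.List.pyGetD_natCast, counts_fold _ _ (by simp) hcs k hk]
    simp only [List.getD_eq_getElem?_getD]
    interval_cases k <;> simp
  have hB : (sort_fun_alt sk).toList
      = ([0,1,2,3,4,5,6,7,8,9] : List Int).flatMap
          (fun d => (List.replicate (((sk.toList.filter (fun c => c ≠ ',')).map pyIntChar).count d)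
            (PySem.Int.toChars d ++ [','])).flatten) := by
    simp only [sort_fun_alt]
    rw [show PySem.List.pyRange 0 10 1 = ([0,1,2,3,4,5,6,7,8,9] : List Int) from by decide]
    rw [outB_toList]
    rw [show ("" : String).toList = [] from rfl, List.nil_append]
    apply flatMap_congr_mem
    intro d hd
    fin_cases hd
    · have h := hcnt 0 (by norm_num)
      simp only [Nat.cast_ofNat, Nat.cast_zero, Nat.cast_one] at h
      rw [h]
      simp
    · have h := hcnt 1 (by norm_num)
      simp only [Nat.cast_ofNat, Nat.cast_zero, Nat.cast_one] at h
      rw [h]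
      simp
    · have h := hcnt 2 (by norm_num)
      simp only [Nat.cast_ofNat, Nat.cast_zero, Nat.cast_one] at h
      rw [h]
      simp
    · have h := hcnt 3 (by norm_num)
      simp only [Nat.cast_ofNat, Nat.cast_zero, Nat.cast_one] at h
      rw [h]
      simp
    · have h := hcnt 4 (by norm_num)
      simp only [Nat.cast_ofNat, Nat.cast_zero, Nat.cast_one] at h
      rw [h]
      simp
    · have h := hcnt 5 (by norm_num)
      simp only [Nat.cast_ofNat, Nat.cast_zero, Nat.cast_one] at h
      rw [h]
      simp
    · have h := hcnt 6 (by norm_num)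
      simp only [Nat.cast_ofNat, Nat.cast_zero, Nat.cast_one] at h
      rw [h]
      simp
    · have h := hcnt 7 (by norm_num)
      simp only [Nat.cast_ofNat, Nat.cast_zero, Nat.cast_one] at h
      rw [h]
      simp
    · have h := hcnt 8 (by norm_num)
      simp only [Nat.cast_ofNat, Nat.cast_zero, Nat.cast_one] at h
      rw [h]
      simp
    · have h := hcnt 9 (by norm_num)
      simp only [Nat.cast_ofNat, Nat.cast_zero, Nat.cast_one] at h
      rw [h]
      simp
  have : (sort_fun sk).toList = (sort_fun_alt sk).toList := by rw [hA, hB]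
  exact String.toList_inj.mp this
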